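-- pv_equiv track=rewrite | github.com/Reptarus/five-parsecs-campaign-manager | fix_all_test_syntax_errors.py | validate_basic_syntax
-- ===== SOURCE A (Python) =====
-- def validate_basic_syntax(content: str) -> bool:
--     """Basic validation of GDScript syntax"""
--     # Check for balanced brackets
--     if content.count('(') != content.count(')'):
--         return False
--     if content.count('[') != content.count(']'):
--         return False
--     if content.count('{') != content.count('}'):
--         return False
--
--     # Check for proper class structure
--     lines = content.split('\n')
--     has_extends = any(line.strip().startswith('extends ') for line in lines)
--
--     return has_extends or any('class ' in line for line in lines)
-- ===== SOURCE B (Python) =====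
-- def validate_basic_syntax(content: str) -> bool:
--     """Basic validation of GDScript syntax.
--
--     Single character-level scan: running bracket balances plus a per-line
--     automaton that recognises lines whose stripped text starts with
--     'extends ' (reset at each newline).  The per-line 'class ' membership
--     test collapses to one whole-string test, since 'class ' contains no
--     newline and so never spans two lines.
--     """
--     PAT = 'extends '          # 8 chars
--     p = b = c = 0
--     st = 0                    # 0 = in leading whitespace; 1..8 = matched st chars of PAT;
--                               # 9 = dead for this line (or already fired)
--     has_extends = False
--     for ch in content:
--         if ch == '(':
--             p += 1
--         elif ch == ')':
--             p -= 1
--         elif ch == '[':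
--             b += 1
--         elif ch == ']':
--             b -= 1
--         elif ch == '{':
--             c += 1
--         elif ch == '}':
--             c -= 1
--         if ch == '\n':
--             st = 0
--         elif st == 0:
--             if ch.isspace():
--                 pass
--             elif ch == PAT[0]:
--                 st = 1
--             else:
--                 st = 9
--         elif st < 8:
--             st = st + 1 if ch == PAT[st] else 9
--         elif st == 8:
--             if not ch.isspace():
--                 has_extends = True
--                 st = 9
--     if p != 0 or b != 0 or c != 0:
--         return False
--     return has_extends or 'class ' in content
-- ===== Notes on version B (the rewrite author's own statement) =====
-- stated objective: alternative
-- what changed: Replaced A's six str.count scans, the newline split into a line list and the two per-line any() scans by a single character-level pass maintaining running bracket balances and a small per-line automaton that recognises lines whose stripped text begins with the extends keyword (reset at each newline), plus one whole-string substring membership test for the class keyword, valid because that needle contains no newline and so occurs in some line iff it occurs in the whole string.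
import Mathlib
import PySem

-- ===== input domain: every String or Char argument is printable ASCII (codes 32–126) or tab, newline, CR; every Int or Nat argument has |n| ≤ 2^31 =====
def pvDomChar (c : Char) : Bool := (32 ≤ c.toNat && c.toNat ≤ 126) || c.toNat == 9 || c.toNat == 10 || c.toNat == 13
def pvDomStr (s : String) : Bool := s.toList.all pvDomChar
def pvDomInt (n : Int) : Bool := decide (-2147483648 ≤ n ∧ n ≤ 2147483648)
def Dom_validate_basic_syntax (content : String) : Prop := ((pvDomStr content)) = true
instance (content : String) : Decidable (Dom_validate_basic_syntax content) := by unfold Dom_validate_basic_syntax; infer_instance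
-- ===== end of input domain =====

-- B replaces A's six str.count scans, the split('\n') line list and the two per-line any()
-- scans by one character-level pass (running bracket balances + a per-line automaton for
-- stripped 'extends ' prefixes) plus a single whole-string 'class ' membership test.

-- ===== PORT A =====
def validate_basic_syntax (content : String) : Bool :=
  if PySem.Str.count content "(" ≠ PySem.Str.count content ")" then false
  else if PySem.Str.count content "[" ≠ PySem.Str.count content "]" then false
  else if PySem.Str.count content "{" ≠ PySem.Str.count content "}" then false
  else
    let lines := ((PySem.Str.split? content "\n").getD [])
    let has_extends := lines.any (fun line => PySem.Str.startswith (PySem.Str.strip line) "extends ")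
    has_extends || lines.any (fun line => PySem.Str.isIn "class " line)

-- ===== PORT B =====
-- PAT = 'extends '
def vbsPat : List Char := ['e', 'x', 't', 'e', 'n', 'd', 's', ' ']

def vbsBracketStep (bal : Int × Int × Int) (ch : Char) : Int × Int × Int :=
  if ch = '(' then (bal.1 + 1, bal.2.1, bal.2.2)
  else if ch = ')' then (bal.1 - 1, bal.2.1, bal.2.2)
  else if ch = '[' then (bal.1, bal.2.1 + 1, bal.2.2)
  else if ch = ']' then (bal.1, bal.2.1 - 1, bal.2.2)
  else if ch = '{' then (bal.1, bal.2.1, bal.2.2 + 1)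
  else if ch = '}' then (bal.1, bal.2.1, bal.2.2 - 1)
  else bal

-- the per-line 'extends ' automaton step (st: 0 leading ws, 1..8 matched chars, 9 dead)
def vbsAutStep (st : Nat) (flag : Bool) (ch : Char) : Nat × Bool :=
  if ch = '\n' then (0, flag)
  else if st = 0 then
    if PySem.Chars.isspace ch then (0, flag)
    else if ch = 'e' then (1, flag)            -- PAT[0]
    else (9, flag)
  else if st < 8 then
    if ch = vbsPat.getD st ' ' then (st + 1, flag) else (9, flag)   -- PAT[st], index in range
  else if st = 8 then
    if ¬ PySem.Chars.isspace ch then (9, true) else (st, flag)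
  else (st, flag)

def vbsGo : List Char → (Int × Int × Int) → Nat → Bool → (Int × Int × Int) × Nat × Bool
  | [], bal, st, flag => (bal, st, flag)
  | ch :: t, bal, st, flag =>
    let bal' := vbsBracketStep bal ch
    let sf := vbsAutStep st flag ch
    vbsGo t bal' sf.1 sf.2

def validate_basic_syntax_alt (content : String) : Bool :=
  let r := vbsGo content.toList (0, 0, 0) 0 false
  if r.1.1 ≠ 0 || r.1.2.1 ≠ 0 || r.1.2.2 ≠ 0 then false
  else r.2.2 || PySem.Str.isIn "class " content

-- ===== PRECONDITION & SPEC =====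
def Spec_validate_basic_syntax (content : String) (out : Bool) : Prop := out = validate_basic_syntax_alt content
instance (content : String) (out : Bool) : Decidable (Spec_validate_basic_syntax content out) := by unfold Spec_validate_basic_syntax; infer_instance

-- ===== CLAIM (what is proved, stated in full; the proofs are below) =====
def Claim_equal_validate_basic_syntax : Prop := ∀ (content : String), Dom_validate_basic_syntax content → Spec_validate_basic_syntax content (validate_basic_syntax content)

-- ===== LEMMAS AND PROOFS =====

-- Python str.count of a single character equals the character count of the list.
theorem count_go_singleton (c : Char) (s : List Char) : ∀ (fuel acc : Nat),
    s.length ≤ fuel → PySem.Chars.count.go [c] fuel s acc = acc + s.count c := by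
  induction s with
  | nil => intro fuel acc _; cases fuel <;> simp [PySem.Chars.count.go]
  | cons h t ih =>
    intro fuel acc hle
    cases fuel with
    | zero => simp at hle
    | succ n =>
      simp only [PySem.Chars.count.go]
      have hle' : t.length ≤ n := by simpa using hle
      by_cases hc : c = h
      · subst hc
        simp only [List.isPrefixOf, beq_self_eq_true, Bool.true_and,
          if_true, List.length_singleton, List.drop_one, List.tail_cons]
        rw [ih n (acc + 1) hle']
        simp [List.count_cons]
        omega
      · rw [if_neg (by simp [List.isPrefixOf, hc])]
        rw [ih n acc hle']
        simp [List.count_cons, Ne.symm hc]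

theorem count_singleton (c : Char) (s : List Char) :
    PySem.Chars.count s [c] = s.count c := by
  simp [PySem.Chars.count, count_go_singleton c s s.length 0 le_rfl]

-- splitOn by '\n' as a simple structural recursion
def linesOf (pre : List Char) : List Char → List (List Char)
  | [] => [pre]
  | c :: t => if c = '\n' then pre :: linesOf [] t else linesOf (pre ++ [c]) t

theorem linesOf_append_nl (a : List Char) : ∀ (pre b : List Char), '\n' ∉ a →
    linesOf pre (a ++ '\n' :: b) = (pre ++ a) :: linesOf [] b := by
  induction a with
  | nil => intro pre b _; simp [linesOf]
  | cons c t ih =>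
    intro pre b h
    have hc : c ≠ '\n' := fun e => h (e ▸ List.mem_cons_self ..)
    simp only [List.cons_append, linesOf, if_neg hc]
    rw [ih (pre ++ [c]) b (fun m => h (List.mem_cons_of_mem _ m))]
    simp

theorem linesOf_no_nl (s : List Char) : ∀ (pre : List Char), '\n' ∉ s →
    linesOf pre s = [pre ++ s] := by
  induction s with
  | nil => intro pre _; simp [linesOf]
  | cons c t ih =>
    intro pre h
    have hc : c ≠ '\n' := fun e => h (e ▸ List.mem_cons_self ..)
    simp only [linesOf, if_neg hc]
    rw [ih (pre ++ [c]) (fun m => h (List.mem_cons_of_mem _ m))]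
    simp

theorem splitOn_go_spec : ∀ (fuel : Nat) (l cur : List Char) (acc : List (List Char)),
    l.length < fuel →
    PySem.Chars.splitOn.go ['\n'] fuel l cur acc = acc.reverse ++ linesOf cur.reverse l := by
  intro fuel
  induction fuel with
  | zero => intro l cur acc h; omega
  | succ n ih =>
    intro l cur acc h
    match l with
    | [] => simp [PySem.Chars.splitOn.go, linesOf]
    | c :: rest =>
      simp only [PySem.Chars.splitOn.go]
      by_cases hc : c = '\n'
      · subst hc
        rw [if_pos (by simp [List.isPrefixOf])]
        simp only [List.length_singleton, List.drop_one, List.tail_cons]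
        rw [ih rest [] (cur.reverse :: acc) (by simpa using h)]
        simp [linesOf]
      · rw [if_neg (by simp [List.isPrefixOf, Ne.symm hc])]
        rw [ih rest (c :: cur) acc (by simpa using h)]
        simp [linesOf, hc]

theorem splitOn_eq_linesOf (s : List Char) :
    PySem.Chars.splitOn s ['\n'] = linesOf [] s := by
  have := splitOn_go_spec (s.length + 1) s [] [] (by omega)
  simpa [PySem.Chars.splitOn] using this

-- the automaton in fire/next form
def autNext (st : Nat) (ch : Char) : Nat := (vbsAutStep st false ch).1
def autFire (st : Nat) (ch : Char) : Bool := (vbsAutStep st false ch).2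

def F : Nat → List Char → Bool
  | _, [] => false
  | st, c :: t => autFire st c || F (autNext st c) t

theorem autStep_eq (st : Nat) (f : Bool) (ch : Char) :
    vbsAutStep st f ch = (autNext st ch, f || autFire st ch) := by
  simp only [autNext, autFire, vbsAutStep]
  split_ifs <;> simp

theorem vbsGo_flag (s : List Char) : ∀ (bal : Int × Int × Int) (st : Nat) (f : Bool),
    (vbsGo s bal st f).2.2 = (f || F st s) := by
  induction s with
  | nil => intro bal st f; simp [vbsGo, F]
  | cons c t ih =>
    intro bal st f
    simp only [vbsGo, autStep_eq, F]
    rw [ih]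
    simp [Bool.or_assoc]

theorem vbsGo_bal (s : List Char) : ∀ (bal : Int × Int × Int) (st : Nat) (f : Bool),
    (vbsGo s bal st f).1
      = (bal.1 + (s.count '(' : Int) - s.count ')',
         bal.2.1 + (s.count '[' : Int) - s.count ']',
         bal.2.2 + (s.count '{' : Int) - s.count '}') := by
  induction s with
  | nil => intro bal st f; simp [vbsGo]
  | cons h t ih =>
    intro bal st f
    simp only [vbsGo]
    rw [ih]
    clear ih
    simp only [vbsBracketStep, List.count_cons]
    split_ifs with h1 h2 h3 h4 h5 h6 <;> simp_all <;> omega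

theorem F_dead (t : List Char) : '\n' ∉ t → F 9 t = false := by
  induction t with
  | nil => intro _; simp [F]
  | cons c r ih =>
    intro h
    have hc : c ≠ '\n' := fun e => h (e ▸ List.mem_cons_self ..)
    have h9 : autNext 9 c = 9 ∧ autFire 9 c = false := by
      unfold autNext autFire vbsAutStep
      simp [hc]
    simp only [F, h9.1, h9.2, Bool.false_or]
    exact ih (fun m => h (List.mem_cons_of_mem _ m))

theorem F_append_nl (a : List Char) : ∀ (st : Nat) (b : List Char), '\n' ∉ a →
    F st (a ++ '\n' :: b) = (F st a || F 0 b) := by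
  induction a with
  | nil =>
    intro st b _
    have : autNext st '\n' = 0 ∧ autFire st '\n' = false := by
      unfold autNext autFire vbsAutStep; simp
    simp [F, this.1, this.2]
  | cons c t ih =>
    intro st b h
    simp only [List.cons_append, F]
    rw [ih _ _ (fun m => h (List.mem_cons_of_mem _ m))]
    simp [Bool.or_assoc]

-- rstrip facts
theorem rstrip_prefix (l : List Char) : PySem.Chars.rstrip l <+: l := by
  unfold PySem.Chars.rstrip
  conv_rhs => rw [← List.reverse_reverse l]
  exact List.reverse_prefix.mpr (List.dropWhile_suffix _)

theorem rstrip_append_all_space {b : List Char} (hb : ∀ x ∈ b, PySem.Chars.isspace x)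
    (a : List Char) : PySem.Chars.rstrip (a ++ b) = PySem.Chars.rstrip a := by
  unfold PySem.Chars.rstrip
  rw [List.reverse_append, List.dropWhile_append]
  rw [if_pos (by rw [List.isEmpty_iff, List.dropWhile_eq_nil_iff]; intro x hx; exact hb x (by simpa using hx))]

theorem rstrip_append_not_all_space {b : List Char} (hb : ¬ ∀ x ∈ b, PySem.Chars.isspace x)
    (a : List Char) : PySem.Chars.rstrip (a ++ b) = a ++ PySem.Chars.rstrip b := by
  unfold PySem.Chars.rstrip
  rw [List.reverse_append, List.dropWhile_append]
  rw [if_neg (by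
    rw [List.isEmpty_iff, List.dropWhile_eq_nil_iff]
    intro hall
    exact hb (fun x hx => hall x (by simpa using hx)))]
  rw [List.reverse_append, List.reverse_reverse]

theorem startswith_pat_append (u : List Char) :
    PySem.Chars.startswith (vbsPat ++ u) vbsPat = true :=
  (PySem.Chars.startswith_iff _ _).mpr (List.prefix_append _ _)

theorem F_match (l : List Char) : ∀ (k : Nat), 1 ≤ k → k ≤ 8 → '\n' ∉ l →
    F k l = PySem.Chars.startswith (PySem.Chars.rstrip (vbsPat.take k ++ l)) vbsPat := by
  induction l with
  | nil =>
    intro k h1 h8 _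
    simp only [List.append_nil, F]
    interval_cases k <;> decide
  | cons c t ih =>
    intro k h1 h8 hnl
    have hc : c ≠ '\n' := fun e => hnl (e ▸ List.mem_cons_self ..)
    have ht : '\n' ∉ t := fun m => hnl (List.mem_cons_of_mem _ m)
    by_cases hk8 : k = 8
    · subst hk8
      by_cases hsp : PySem.Chars.isspace c
      · have hstep : autNext 8 c = 8 ∧ autFire 8 c = false := by
          simp only [autNext, autFire, vbsAutStep]; simp [hc, hsp]
        simp only [F, hstep.1, hstep.2, Bool.false_or]
        rw [ih 8 (by omega) le_rfl ht]
        have hpat8 : vbsPat.take 8 = vbsPat := by decide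
        rw [hpat8]
        by_cases hall : ∀ x ∈ t, PySem.Chars.isspace x
        · rw [rstrip_append_all_space hall,
              rstrip_append_all_space (b := c :: t)
                (by intro x hx; rcases List.mem_cons.mp hx with h | h
                    exacts [h ▸ hsp, hall x h])]
        · rw [rstrip_append_not_all_space hall,
              rstrip_append_not_all_space (b := c :: t)
                (fun hcall => hall (fun x hx => hcall x (List.mem_cons_of_mem _ hx)))]
          rw [startswith_pat_append, startswith_pat_append]
      · have hstep : autFire 8 c = true := by
          simp only [autFire, vbsAutStep]; simp [hc, hsp]
        simp only [F, hstep, Bool.true_or]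
        have hpat8 : vbsPat.take 8 = vbsPat := by decide
        rw [hpat8, rstrip_append_not_all_space (b := c :: t)
          (fun h => hsp (h c (List.mem_cons_self ..)))]
        rw [startswith_pat_append]
    · have hk7 : k < 8 := by omega
      have hklen : k < vbsPat.length := by simp [vbsPat]; omega
      have hpk : vbsPat[k]?.getD ' ' ≠ '\n' := by interval_cases k <;> decide
      by_cases hcp : c = vbsPat.getD k ' '
      · have hstep : autNext k c = k + 1 ∧ autFire k c = false := by
          simp only [autNext, autFire, vbsAutStep]
          simp [hc, show k ≠ 0 by omega, hk7, hcp, List.getD, hpk]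
        simp only [F, hstep.1, hstep.2, Bool.false_or]
        rw [ih (k + 1) (by omega) (by omega) ht]
        have hck : c = vbsPat[k] := by rw [hcp, List.getD_eq_getElem vbsPat ' ' hklen]
        have harg : vbsPat.take k ++ c :: t = vbsPat.take (k + 1) ++ t := by
          rw [hck, ← List.take_append_getElem hklen, List.append_assoc, List.singleton_append]
        rw [harg]
      · have hstep : autNext k c = 9 ∧ autFire k c = false := by
          simp only [autNext, autFire, vbsAutStep]
          simp [hc, show k ≠ 0 by omega, hk7, hpk, show ¬ c = vbsPat[k]?.getD ' ' from hcp]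
        simp only [F, hstep.1, hstep.2, Bool.false_or]
        rw [F_dead t ht]
        cases hS : PySem.Chars.startswith (PySem.Chars.rstrip (vbsPat.take k ++ c :: t)) vbsPat with
        | false => rfl
        | true =>
          exfalso
          have hpre : vbsPat <+: vbsPat.take k ++ c :: t :=
            ((PySem.Chars.startswith_iff _ _).mp hS).trans (rstrip_prefix _)
          have hlen : (vbsPat.take k).length = k := by simp [vbsPat]; omega
          have := List.IsPrefix.getElem hpre hklen
          rw [List.getElem_append_right (by omega)] at this
          simp [hlen] at this
          exact hcp (by rw [List.getD_eq_getElem vbsPat ' ' hklen]; exact this.symm)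

theorem F_line (l : List Char) : '\n' ∉ l →
    F 0 l = PySem.Chars.startswith (PySem.Chars.strip l) vbsPat := by
  induction l with
  | nil => intro _; decide
  | cons c t ih =>
    intro hnl
    have hc : c ≠ '\n' := fun e => hnl (e ▸ List.mem_cons_self ..)
    have ht : '\n' ∉ t := fun m => hnl (List.mem_cons_of_mem _ m)
    by_cases hsp : PySem.Chars.isspace c
    · have hstep : autNext 0 c = 0 ∧ autFire 0 c = false := by
        simp only [autNext, autFire, vbsAutStep]; simp [hc, hsp]
      simp only [F, hstep.1, hstep.2, Bool.false_or]
      rw [ih ht]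
      simp [PySem.Chars.strip, PySem.Chars.lstrip, List.dropWhile_cons, hsp]
    · by_cases hce : c = 'e'
      · have hstep : autNext 0 c = 1 ∧ autFire 0 c = false := by
          simp only [autNext, autFire, vbsAutStep]
          simp [hc, hsp, hce, show PySem.Chars.isspace 'e' = false by decide]
        simp only [F, hstep.1, hstep.2, Bool.false_or]
        rw [F_match t 1 le_rfl (by omega) ht]
        have : PySem.Chars.strip (c :: t) = PySem.Chars.rstrip (vbsPat.take 1 ++ t) := by
          simp [PySem.Chars.strip, PySem.Chars.lstrip, List.dropWhile_cons, hsp, hce, vbsPat,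
            show PySem.Chars.isspace 'e' = false by decide]
        rw [this]
      · have hstep : autNext 0 c = 9 ∧ autFire 0 c = false := by
          simp only [autNext, autFire, vbsAutStep]; simp [hc, hsp, hce]
        simp only [F, hstep.1, hstep.2, Bool.false_or]
        rw [F_dead t ht]
        cases hS : PySem.Chars.startswith (PySem.Chars.strip (c :: t)) vbsPat with
        | false => rfl
        | true =>
          exfalso
          have hls : PySem.Chars.lstrip (c :: t) = c :: t := by
            simp [PySem.Chars.lstrip, List.dropWhile_cons, hsp]
          have hpre : vbsPat <+: c :: t := by
            have h1 := (PySem.Chars.startswith_iff _ _).mp hS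
            unfold PySem.Chars.strip at h1
            rw [hls] at h1
            exact h1.trans (rstrip_prefix _)
          have : 'e' = c ∧ _ := List.cons_prefix_cons.mp hpre
          exact hce this.1.symm

-- helper: congruence for List.any
theorem any_congr' {α : Type} (l : List α) (p q : α → Bool) (h : ∀ x ∈ l, p x = q x) :
    l.any p = l.any q := by
  rw [Bool.eq_iff_iff]
  simp only [List.any_eq_true]
  constructor
  · rintro ⟨x, hx, hp⟩; exact ⟨x, hx, (h x hx) ▸ hp⟩
  · rintro ⟨x, hx, hq⟩; exact ⟨x, hx, (h x hx) ▸ hq⟩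

theorem mem_linesOf_no_nl (s : List Char) : ∀ (pre l : List Char), '\n' ∉ pre →
    l ∈ linesOf pre s → '\n' ∉ l := by
  induction s with
  | nil =>
    intro pre l hpre hl
    simp [linesOf] at hl
    exact hl ▸ hpre
  | cons c t ih =>
    intro pre l hpre hl
    by_cases hc : c = '\n'
    · subst hc
      rw [show linesOf pre ('\n' :: t) = pre :: linesOf [] t from by simp [linesOf]] at hl
      rcases List.mem_cons.mp hl with h | h
      · exact h ▸ hpre
      · exact ih [] l (by simp) h
    · simp only [linesOf, if_neg hc] at hl
      have hpre' : '\n' ∉ pre ++ [c] := by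
        intro hm
        rcases List.mem_append.mp hm with h | h
        · exact hpre h
        · have hcc : '\n' = c := by simpa using h
          exact hc hcc.symm
      exact ih (pre ++ [c]) l hpre' hl

theorem prefix_append_cons_of_not_mem {x : Char} : ∀ {sub : List Char}, x ∉ sub →
    ∀ (d e : List Char), sub <+: (d ++ x :: e) → sub <+: d := by
  intro sub
  induction sub with
  | nil => intro _ d e _; exact List.nil_prefix
  | cons s st ih =>
    intro hx d e h
    cases d with
    | nil =>
      exfalso
      have := (List.cons_prefix_cons.mp (by simpa using h)).1
      exact hx (this ▸ List.mem_cons_self ..)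
    | cons c dt =>
      have h' := List.cons_prefix_cons.mp (by simpa using h)
      exact List.cons_prefix_cons.mpr
        ⟨h'.1, ih (fun m => hx (List.mem_cons_of_mem _ m)) dt e h'.2⟩

theorem infix_append_cons_iff {x : Char} {sub : List Char} (hx : x ∉ sub) :
    ∀ (a b : List Char), (sub <:+: (a ++ x :: b)) ↔ (sub <:+: a ∨ sub <:+: b) := by
  intro a
  induction a with
  | nil =>
    intro b
    simp only [List.nil_append]
    constructor
    · intro h
      rcases List.infix_cons_iff.mp h with h | h
      · have h0 := prefix_append_cons_of_not_mem hx [] b h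
        have hsub : sub = [] := List.prefix_nil.mp h0
        exact Or.inr (hsub ▸ List.nil_infix)
      · exact Or.inr h
    · rintro (h | h)
      · have hsub : sub = [] := List.infix_nil.mp h
        exact hsub ▸ List.nil_infix
      · exact h.trans (List.suffix_cons x b).isInfix
  | cons c t ih =>
    intro b
    constructor
    · intro h
      rcases List.infix_cons_iff.mp (by simpa using h) with h | h
      · exact Or.inl ((prefix_append_cons_of_not_mem hx (c :: t) b (by simpa using h)).isInfix)
      · rcases (ih b).mp h with h | h
        · exact Or.inl (List.infix_cons_iff.mpr (Or.inr h))
        · exact Or.inr h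
    · rintro (h | h)
      · exact h.trans ((List.prefix_append (c :: t) (x :: b)).isInfix)
      · exact h.trans ((List.suffix_cons x b).trans (List.suffix_append (c :: t) (x :: b))).isInfix

theorem isIn_linesOf (sub : List Char) (hx : '\n' ∉ sub) :
    ∀ (s pre : List Char),
    ((linesOf pre s).any (fun l => PySem.Chars.isIn sub l)) = PySem.Chars.isIn sub (pre ++ s) := by
  intro s
  induction s with
  | nil => intro pre; simp [linesOf]
  | cons c t ih =>
    intro pre
    by_cases hc : c = '\n'
    · subst hc
      rw [show linesOf pre ('\n' :: t) = pre :: linesOf [] t from by simp [linesOf]]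
      simp only [List.any_cons, ih []]
      rw [Bool.eq_iff_iff]
      simp only [Bool.or_eq_true, PySem.Chars.isIn_iff_infix, List.nil_append]
      exact (or_congr Iff.rfl Iff.rfl).trans (infix_append_cons_iff hx pre t).symm
    · simp only [linesOf, if_neg hc, ih (pre ++ [c]), List.append_assoc, List.singleton_append]

theorem F_lines : ∀ (n : Nat) (s : List Char), s.length = n →
    F 0 s = (linesOf [] s).any (fun l => F 0 l) := by
  intro n
  induction n using Nat.strong_induction_on with
  | _ n ih =>
    intro s hn
    by_cases hmem : '\n' ∈ s
    · -- split at the first newline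
      have hsplit : s = s.takeWhile (· != '\n') ++ List.dropWhile (· != '\n') s :=
        (List.takeWhile_append_dropWhile).symm
      have hdne : List.dropWhile (· != '\n') s ≠ [] := by
        intro h0
        rw [List.dropWhile_eq_nil_iff] at h0
        have := h0 '\n' hmem
        simp at this
      obtain ⟨d, hd⟩ : ∃ d, List.dropWhile (· != '\n') s = '\n' :: d := by
        cases hD : List.dropWhile (· != '\n') s with
        | nil => exact absurd hD hdne
        | cons y d =>
          have : ¬ (y != '\n') = true := by
            have := List.head_dropWhile_not (· != '\n') (l := s) (by simp [hD])
            simpa [hD] using this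
          simp at this
          exact ⟨d, by rw [← this]⟩
      set a := s.takeWhile (· != '\n') with ha
      have hna : '\n' ∉ a := by
        intro hm
        have := List.mem_takeWhile_imp hm
        simp at this
      have hs : s = a ++ '\n' :: d := by rw [hsplit, hd]
      have hlen : d.length < n := by
        have := congrArg List.length hs
        simp at this
        omega
      rw [hs, F_append_nl a 0 d hna, linesOf_append_nl a [] d hna]
      simp only [List.any_cons, List.nil_append]
      rw [ih d.length hlen d rfl]
    · rw [linesOf_no_nl s [] hmem]
      simp


-- ===== VERDICT (by name: the statement is the Claim_ definition above) =====
theorem validate_basic_syntax_spec : Claim_equal_validate_basic_syntax := by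
  intro content _
  unfold Spec_validate_basic_syntax validate_basic_syntax validate_basic_syntax_alt
  dsimp only
  have hc : ∀ c : Char, PySem.Str.count content (String.mk [c]) = content.toList.count c := by
    intro c
    have h1 : (String.mk [c]).toList = [c] := Eq.symm ((fun {l} {s} => String.ofList_eq.mp) rfl)
    simp [PySem.Str.count, h1, count_singleton]
  have hsplit : (PySem.Str.split? content "\n").getD []
      = (linesOf [] content.toList).map String.ofList := by
    have hsep : ("\n" : String).toList = ['\n'] := by decide
    simp [PySem.Str.split?, PySem.Chars.split?, hsep, splitOn_eq_linesOf]
  have hext : ((linesOf [] content.toList).map String.ofList).any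
        (fun line => PySem.Str.startswith (PySem.Str.strip line) "extends ")
      = (linesOf [] content.toList).any
        (fun l => PySem.Chars.startswith (PySem.Chars.strip l) vbsPat) := by
    rw [List.any_map]
    apply any_congr'
    intro l _
    have hpat : ("extends " : String).toList = vbsPat := by decide
    simp [Function.comp, hpat]
  have hflag : (vbsGo content.toList (0, 0, 0) 0 false).2.2
      = (linesOf [] content.toList).any
        (fun l => PySem.Chars.startswith (PySem.Chars.strip l) vbsPat) := by
    rw [vbsGo_flag, Bool.false_or, F_lines content.toList.length content.toList rfl]
    apply any_congr'
    intro l hl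
    exact F_line l (mem_linesOf_no_nl content.toList [] l (by simp) hl)
  have hclass : ((linesOf [] content.toList).map String.ofList).any
        (fun line => PySem.Str.isIn "class " line)
      = PySem.Str.isIn "class " content := by
    rw [List.any_map]
    have hcl : ("class " : String).toList = ['c','l','a','s','s',' '] := by decide
    have h2 := isIn_linesOf ['c','l','a','s','s',' '] (by decide) content.toList []
    simp only [List.nil_append] at h2
    rw [show ((fun line => PySem.Str.isIn "class " line) ∘ String.ofList)
          = (fun l => PySem.Chars.isIn ['c','l','a','s','s',' '] l) from by
        funext l
        simp [Function.comp, hcl]]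
    rw [h2]
    simp [hcl]
  rw [vbsGo_bal]
  rw [hsplit]
  rw [show ("(" : String) = String.mk ['('] from rfl, show (")" : String) = String.mk [')'] from rfl,
      show ("[" : String) = String.mk ['['] from rfl, show ("]" : String) = String.mk [']'] from rfl,
      show ("{" : String) = String.mk ['{'] from rfl, show ("}" : String) = String.mk ['}'] from rfl,
      hc, hc, hc, hc, hc, hc]
  by_cases e1 : content.toList.count '(' = content.toList.count ')' <;>
    by_cases e2 : content.toList.count '[' = content.toList.count ']' <;>
    by_cases e3 : content.toList.count '{' = content.toList.count '}' <;>
    simp_all <;> omega
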